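-- pv_equiv track=rewrite | github.com/dpaletti/dovado | dovado_rtl/builders/vivado/builder.py | _get_section
-- ===== SOURCE A (Python) =====
-- def _get_section(report_structure: dict[str, list[str]], utilisation_metric: str):
--     for section, metrics in report_structure.items():
--         if utilisation_metric.lower() in [metric.lower() for metric in metrics]:
--             return section
--     raise ValueError(
--         "Could not find "
--         + str(utilisation_metric)
--         + " in utilisation report:\n"
--         + str(report_structure)
--     )
-- ===== SOURCE B (Python) =====
-- def _get_section(report_structure: dict[str, list[str]], utilisation_metric: str):
--     # Flatten the report into two parallel flat lists (lowered metric / owning section),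
--     # then answer with one list.index lookup on the flat metric list.
--     lowered = [m.lower() for metrics in report_structure.values() for m in metrics]
--     sections = [s for s, metrics in report_structure.items() for _ in metrics]
--     try:
--         return sections[lowered.index(utilisation_metric.lower())]
--     except ValueError:
--         raise ValueError(
--             "Could not find "
--             + str(utilisation_metric)
--             + " in utilisation report:\n"
--             + str(report_structure)
--         )
-- ===== Notes on version B (the rewrite author's own statement) =====
-- stated objective: alternative
-- what changed: B flattens the report into two parallel flat lists (lowered metric, owning section) via comprehensions and answers with a single list.index on the flat metric list, instead of A's per-section membership scan that rebuilds a lowercased list for each section.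
import Mathlib
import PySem

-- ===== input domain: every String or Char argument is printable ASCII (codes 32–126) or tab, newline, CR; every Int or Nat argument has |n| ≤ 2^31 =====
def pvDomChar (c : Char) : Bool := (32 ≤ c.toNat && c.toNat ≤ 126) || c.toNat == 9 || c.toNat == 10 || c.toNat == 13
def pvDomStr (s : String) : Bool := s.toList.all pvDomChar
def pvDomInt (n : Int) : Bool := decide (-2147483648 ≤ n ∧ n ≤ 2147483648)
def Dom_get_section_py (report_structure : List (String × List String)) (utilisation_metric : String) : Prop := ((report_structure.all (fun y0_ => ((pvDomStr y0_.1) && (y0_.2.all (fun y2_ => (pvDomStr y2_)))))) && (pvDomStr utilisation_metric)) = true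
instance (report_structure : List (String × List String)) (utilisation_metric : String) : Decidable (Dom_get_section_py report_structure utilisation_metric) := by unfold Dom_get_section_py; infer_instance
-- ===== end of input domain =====

-- B flattens the report into two parallel flat lists (lowered metric / owning section) and
-- answers with one list.index lookup, instead of A's per-section membership scan (alternative
-- decomposition; same asymptotic cost). On "not found" Python raises ValueError (excluded by Pre_).


-- ===== PORT A =====
-- A: scan sections in order; return the first whose lowercased metric list contains
-- utilisation_metric.lower(); if none, Python raises ValueError ("" here, excluded by Pre_).
def get_section_py (report_structure : List (String × List String)) (utilisation_metric : String) : String :=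
  match report_structure with
  | [] => ""  -- Python: raise ValueError (excluded by Pre_)
  | (sec, metrics) :: rest =>
    if PySem.Str.lower utilisation_metric ∈ metrics.map PySem.Str.lower then sec
    else get_section_py rest utilisation_metric

-- ===== PORT B =====
-- B: sections[lowered.index(key)], "" standing for the ValueError path (excluded by Pre_).
def pvLookup (lowered sections : List String) (key : String) : String :=
  match PySem.List.index? lowered key with
  | some j => (PySem.List.pyGet? sections (j : Int)).getD ""
  | none => ""  -- Python: raise ValueError (excluded by Pre_)

def get_section_py_alt (report_structure : List (String × List String)) (utilisation_metric : String) : String :=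
  pvLookup
    (report_structure.flatMap (fun p => p.2.map PySem.Str.lower))
    (report_structure.flatMap (fun p => p.2.map (fun _ => p.1)))
    (PySem.Str.lower utilisation_metric)

-- ===== PRECONDITION & SPEC =====
-- Pre_ excludes exactly the inputs where no section's lowercased metrics contain the
-- lowercased utilisation_metric: there Python A (and B) raise ValueError.
def Pre_get_section_py (report_structure : List (String × List String)) (utilisation_metric : String) : Prop :=
  ∃ p ∈ report_structure, PySem.Str.lower utilisation_metric ∈ p.2.map PySem.Str.lower
instance (report_structure : List (String × List String)) (utilisation_metric : String) : Decidable (Pre_get_section_py report_structure utilisation_metric) := by unfold Pre_get_section_py; infer_instance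

def pvWitness_get_section_py : (List (String × List String)) × String :=
  ([("Slice Logic", ["LUT as Logic", "Slice Registers"]), ("DSP", ["DSPs"])], "slice registers")

def Spec_get_section_py (report_structure : List (String × List String)) (utilisation_metric : String) (out : String) : Prop := out = get_section_py_alt report_structure utilisation_metric
instance (report_structure : List (String × List String)) (utilisation_metric : String) (out : String) : Decidable (Spec_get_section_py report_structure utilisation_metric out) := by unfold Spec_get_section_py; infer_instance

-- ===== CLAIM =====
def Claim_equal_get_section_py : Prop := ∀ (report_structure : List (String × List String)) (utilisation_metric : String), Dom_get_section_py report_structure utilisation_metric → Pre_get_section_py report_structure utilisation_metric → Spec_get_section_py report_structure utilisation_metric (get_section_py report_structure utilisation_metric)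

-- ===== LEMMAS AND PROOFS =====

theorem pvIndex_append_not_mem {α : Type} [DecidableEq α] (l t : List α) (v : α) (h : v ∉ l) :
    PySem.List.index? (l ++ t) v = (PySem.List.index? t v).map (· + l.length) := by
  induction l with
  | nil => simp [Option.map_id']
  | cons x l ih =>
    have hx : x ≠ v := by rintro rfl; exact h (List.mem_cons_self)
    rw [List.cons_append, PySem.List.index?_cons_of_ne _ hx,
        ih (fun hv => h (List.mem_cons_of_mem _ hv)), Option.map_map]
    cases PySem.List.index? t v <;> simp

-- B's flat lookup unrolls one section at a time, exactly as A's scan does.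
theorem pvAlt_cons (s : String) (ms : List String) (rest : List (String × List String))
    (um : String) :
    get_section_py_alt ((s, ms) :: rest) um =
      if PySem.Str.lower um ∈ ms.map PySem.Str.lower then s
      else get_section_py_alt rest um := by
  unfold get_section_py_alt pvLookup
  rw [List.flatMap_cons, List.flatMap_cons]
  dsimp only
  by_cases hm : PySem.Str.lower um ∈ ms.map PySem.Str.lower
  · rw [if_pos hm]
    rw [PySem.List.index?_append_of_mem _ hm]
    obtain ⟨j, hj⟩ := Option.isSome_iff_exists.mp
      ((PySem.List.index?_isSome_iff (ms.map PySem.Str.lower) _).mpr hm)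
    have hjlt : j < ms.length := by
      obtain ⟨hk, _⟩ := PySem.List.getElem_of_index?_eq_some hj
      simpa using hk
    rw [hj]
    simp only [PySem.List.pyGet?_natCast]
    rw [List.getElem?_append_left (by simpa using hjlt)]
    simp [hjlt]
  · rw [if_neg hm, pvIndex_append_not_mem _ _ _ hm]
    cases hidx : PySem.List.index?
        (rest.flatMap fun p => p.2.map PySem.Str.lower) (PySem.Str.lower um) with
    | none => rfl
    | some j =>
      rw [Option.map_some]
      simp only [PySem.List.pyGet?_natCast]
      have hlen : (ms.map fun (_ : String) => s).length = (ms.map PySem.Str.lower).length := by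
        simp
      rw [show j + (ms.map PySem.Str.lower).length = (ms.map fun (_ : String) => s).length + j by
        omega]
      rw [List.getElem?_append_right (by omega)]
      simp

theorem pvMain (rs : List (String × List String)) (um : String) :
    get_section_py rs um = get_section_py_alt rs um := by
  induction rs with
  | nil => rfl
  | cons p rest ih =>
    obtain ⟨s, ms⟩ := p
    rw [pvAlt_cons]
    simp only [get_section_py]
    split_ifs with h <;> simp [ih]

-- ===== VERDICT =====
theorem get_section_py_spec : Claim_equal_get_section_py := by
  intro rs um _ _
  unfold Spec_get_section_py
  exact pvMain rs um
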